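-- pv_equiv track=rewrite | github.com/ChrisRPL/Futurnal | tests/search/fixtures/golden_queries.py | generate_benchmark_queries
-- ===== SOURCE A (Python) =====
-- from typing import Any, Dict, List, Optional
--
-- def generate_benchmark_queries(n: int = 100) -> List[str]:
--     """Generate queries for performance benchmarking.
--
--     Args:
--         n: Number of queries to generate
--
--     Returns:
--         List of query strings for latency testing
--     """
--     base_queries = [
--         "What happened yesterday?",
--         "Tell me about projects",
--         "Why did this fail?",
--         "What is the deadline?",
--         "How does authentication work?",
--         "Meeting notes from last week",
--         "Find documents about budgets",
--         "What caused the issue?",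
--         "Show me the code for login",
--         "Events in January",
--         "Project status update",
--         "Who is responsible for this?",
--         "What are the next steps?",
--         "Find invoices from Q4",
--         "Search notes about clients",
--     ]
--
--     # Generate n queries by cycling through base queries with variations
--     queries = []
--     for i in range(n):
--         base = base_queries[i % len(base_queries)]
--         # Add slight variations to avoid pure cache hits
--         if i >= len(base_queries):
--             base = f"{base} (variant {i // len(base_queries)})"
--         queries.append(base)
--
--     return queries
-- ===== SOURCE B (Python) =====
-- from typing import List
--
--
-- def generate_benchmark_queries(n: int = 100) -> List[str]:
--     """Generate queries for performance benchmarking (cycle-wise construction)."""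
--     base_queries = [
--         "What happened yesterday?",
--         "Tell me about projects",
--         "Why did this fail?",
--         "What is the deadline?",
--         "How does authentication work?",
--         "Meeting notes from last week",
--         "Find documents about budgets",
--         "What caused the issue?",
--         "Show me the code for login",
--         "Events in January",
--         "Project status update",
--         "Who is responsible for this?",
--         "What are the next steps?",
--         "Find invoices from Q4",
--         "Search notes about clients",
--     ]
--     m = len(base_queries)
--     cycles = (n + m - 1) // m if n > 0 else 0
--     queries: List[str] = []
--     for c in range(cycles):
--         suffix = "" if c == 0 else f" (variant {c})"
--         queries.extend(base + suffix for base in base_queries)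
--     return queries[:n]
-- ===== Notes on version B (the rewrite author's own statement) =====
-- stated objective: alternative
-- what changed: B replaces A's single modulo/division-indexed loop over range(n) by building whole suffixed copies of the base list cycle by cycle and truncating to n, eliminating the i % len / i // len index arithmetic.
import Mathlib
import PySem

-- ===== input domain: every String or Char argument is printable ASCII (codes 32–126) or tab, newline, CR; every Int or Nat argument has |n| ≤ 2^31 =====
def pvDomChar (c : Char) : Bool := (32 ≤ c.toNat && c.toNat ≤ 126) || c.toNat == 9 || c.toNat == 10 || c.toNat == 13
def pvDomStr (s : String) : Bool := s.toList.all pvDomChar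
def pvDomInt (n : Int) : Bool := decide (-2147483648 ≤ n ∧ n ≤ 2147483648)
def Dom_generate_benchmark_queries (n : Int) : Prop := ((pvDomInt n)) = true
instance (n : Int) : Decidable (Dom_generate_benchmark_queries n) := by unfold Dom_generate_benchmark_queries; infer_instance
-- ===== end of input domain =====

-- B builds the result cycle by cycle (full suffixed copies of the base list, then truncates to n),
-- replacing A's per-index modulo/division arithmetic; objective: alternative decomposition (same cost).

def pvBaseQueries : List String := [
  "What happened yesterday?",
  "Tell me about projects",
  "Why did this fail?",
  "What is the deadline?",
  "How does authentication work?",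
  "Meeting notes from last week",
  "Find documents about budgets",
  "What caused the issue?",
  "Show me the code for login",
  "Events in January",
  "Project status update",
  "Who is responsible for this?",
  "What are the next steps?",
  "Find invoices from Q4",
  "Search notes about clients"]

-- ===== PORT A =====
def generate_benchmark_queries (n : Int) : List String :=
  (PySem.List.pyRange 0 n 1).foldl (fun queries i =>
    let base := (PySem.List.pyGet? pvBaseQueries
        (PySem.Int.mod i (PySem.List.len pvBaseQueries))).getD ""
    let base := if i ≥ PySem.List.len pvBaseQueries then
        base ++ " (variant " ++
          PySem.Int.toStr (PySem.Int.floordiv i (PySem.List.len pvBaseQueries)) ++ ")"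
      else base
    queries ++ [base]) []

-- ===== PORT B =====
def generate_benchmark_queries_alt (n : Int) : List String :=
  let m := PySem.List.len pvBaseQueries
  let cycles := if n > 0 then PySem.Int.floordiv (n + m - 1) m else 0
  let queries := (PySem.List.pyRange 0 cycles 1).foldl (fun queries c =>
    let suffix := if c = 0 then "" else " (variant " ++ PySem.Int.toStr c ++ ")"
    queries ++ pvBaseQueries.map (fun base => base ++ suffix)) []
  PySem.List.slice queries none (some n)

-- ===== PRECONDITION & SPEC =====
def Spec_generate_benchmark_queries (n : Int) (out : List String) : Prop := out = generate_benchmark_queries_alt n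
instance (n : Int) (out : List String) : Decidable (Spec_generate_benchmark_queries n out) := by unfold Spec_generate_benchmark_queries; infer_instance

-- ===== CLAIM (what is proved, stated in full; the proofs are below) =====
def Claim_equal_generate_benchmark_queries : Prop := ∀ (n : Int), Dom_generate_benchmark_queries n → Spec_generate_benchmark_queries n (generate_benchmark_queries n)

-- ===== LEMMAS AND PROOFS =====

-- the common per-index value (on Nat indices)
def pvItem (k : Nat) : String :=
  let t := pvBaseQueries.getD (k % 15) ""
  if 15 ≤ k then t ++ " (variant " ++ PySem.Int.toStr ((k / 15 : Nat) : Int) ++ ")" else t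

-- the value B appends for one full cycle c
def pvCycle (c : Nat) : List String :=
  pvBaseQueries.map (fun base =>
    base ++ (if (c : Int) = 0 then "" else " (variant " ++ PySem.Int.toStr (c : Int) ++ ")"))

lemma pvItem_in_cycle (c j : Nat) (hc : 0 < c) (hj : j < 15) :
    pvItem (15 * c + j) =
      pvBaseQueries.getD j "" ++ (" (variant " ++ PySem.Int.toStr (c : Int) ++ ")") := by
  have h1 : (15 * c + j) % 15 = j := by omega
  have h2 : (15 * c + j) / 15 = c := by omega
  have h3 : 15 ≤ 15 * c + j := by omega
  simp [pvItem, h1, h2, h3, String.append_assoc]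

lemma pvCycle_eq_map (c : Nat) :
    pvCycle c = (List.range 15).map (fun j => pvItem (15 * c + j)) := by
  match c with
  | 0 => decide
  | Nat.succ c' =>
    have hcz : ¬((c' : Int) + 1 = 0) := by omega
    have hmap : ((List.range 15).map (fun j => pvItem (15 * (c' + 1) + j)))
        = (List.range 15).map (fun j =>
            pvBaseQueries.getD j "" ++ (" (variant " ++ PySem.Int.toStr ((c' + 1 : Nat) : Int) ++ ")")) := by
      apply List.map_congr_left
      intro j hj
      exact pvItem_in_cycle (c' + 1) j (by omega) (List.mem_range.mp hj)
    rw [hmap]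
    simp [pvCycle, pvBaseQueries, List.range_succ, hcz]

lemma pvFlat (C : Nat) :
    (List.range C).flatMap pvCycle = (List.range (15 * C)).map pvItem := by
  induction C with
  | zero => simp
  | succ C ih =>
    have hr : 15 * (C + 1) = 15 * C + 15 := by ring
    rw [List.range_succ, List.flatMap_append, ih, hr, List.range_add, List.map_append]
    simp only [List.flatMap_cons, List.flatMap_nil, List.append_nil, List.map_map]
    rw [pvCycle_eq_map]
    rfl

lemma pvA_eq (n : Int) :
    generate_benchmark_queries n = (List.range n.toNat).map pvItem := by
  unfold generate_benchmark_queries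
  rw [PySem.List.foldl_append_singleton_eq_map, PySem.List.pyRange_one, List.map_map]
  simp only [Int.sub_zero, List.nil_append]
  apply List.map_congr_left
  intro k _
  have hlen : PySem.List.len pvBaseQueries = ((15 : Nat) : Int) := by decide
  simp only [Function.comp, zero_add, hlen, PySem.Int.mod_natCast, PySem.Int.floordiv_natCast,
    PySem.List.pyGet?_natCast, ge_iff_le, Nat.cast_le, pvItem,
    List.getD_eq_getElem?_getD]

lemma pvB_eq (n : Int) :
    generate_benchmark_queries_alt n = (List.range n.toNat).map pvItem := by
  unfold generate_benchmark_queries_alt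
  by_cases hn : n > 0
  · simp only [hn, if_pos, PySem.List.len_eq]
    rw [PySem.List.foldl_append_eq_flatMap, List.nil_append]
    have hlen : ((pvBaseQueries.length : Int)) = 15 := by decide
    rw [hlen]
    have hcpos : 0 < PySem.Int.floordiv (n + 15 - 1) 15 := by
      rw [PySem.Int.floordiv_eq_ediv_of_pos (by omega)]; omega
    set cyc : Int := PySem.Int.floordiv (n + 15 - 1) 15 with hcyc
    have hflat : (PySem.List.pyRange 0 cyc 1).flatMap
        (fun c => pvBaseQueries.map (fun base =>
          base ++ (if c = 0 then "" else " (variant " ++ PySem.Int.toStr c ++ ")")))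
        = (List.range (15 * cyc.toNat)).map pvItem := by
      rw [PySem.List.pyRange_one]
      simp only [Int.sub_zero, List.flatMap_map]
      rw [← pvFlat cyc.toNat]
      apply List.flatMap_congr
      intro c _
      simp [pvCycle]
    rw [hflat]
    have hle : n.toNat ≤ 15 * cyc.toNat := by
      have := hcyc
      rw [PySem.Int.floordiv_eq_ediv_of_pos (by omega)] at this
      omega
    rw [PySem.List.slice_to _ (by omega : (0:Int) ≤ n), ← List.map_take, List.take_range]
    have hmin : min n.toNat (15 * cyc.toNat) = n.toNat := by omega
    rw [hmin]
  · simp only [hn, ite_false]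
    have h0 : n.toNat = 0 := by omega
    rw [h0]
    simp [PySem.List.slice]

-- ===== VERDICT (by name: the statement is the Claim_ definition above) =====
theorem generate_benchmark_queries_spec : Claim_equal_generate_benchmark_queries := by
  intro n _
  unfold Spec_generate_benchmark_queries
  rw [pvA_eq, pvB_eq]
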